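-- pv_equiv track=rewrite | github.com/nantas/game-design-database | src/game_design_patterns/markdown.py | upsert_bullet_in_section
-- ===== SOURCE A (Python) =====
-- def upsert_bullet_in_section(markdown_text: str, section_heading: str, item: str) -> tuple[str, bool]:
--     bullet_line = f"- {item}".rstrip()
--     lines = markdown_text.splitlines()
--
--     if bullet_line in lines:
--         return markdown_text, False
--
--     try:
--         section_start = next(
--             index for index, line in enumerate(lines) if line.strip() == section_heading
--         )
--     except StopIteration as exc:
--         raise ValueError(f"section not found: {section_heading}") from exc
--
--     body_start = section_start + 1
--     while body_start < len(lines) and lines[body_start].strip() == "":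
--         body_start += 1
--
--     section_end = body_start
--     while section_end < len(lines) and not lines[section_end].startswith("## "):
--         section_end += 1
--
--     cleaned_body: list[str] = []
--     for body_line in lines[body_start:section_end]:
--         if body_line.strip() == "-":
--             continue
--         cleaned_body.append(body_line)
--
--     updated_lines = lines[:body_start] + cleaned_body + [bullet_line] + lines[section_end:]
--     updated_text = "\n".join(updated_lines).rstrip() + "\n"
--     return updated_text, True
-- ===== SOURCE B (Python) =====
-- # B: block decomposition — split the document once into heading-delimited blocks,
-- # rewrite the single block that contains the section heading, and flatten back.
-- def _blocks(lines):
--     """Split lines into blocks: each block after a '## ' line runs until the next one."""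
--     if not lines:
--         return []
--     head, tail = lines[0], lines[1:]
--     j = 0
--     while j < len(tail) and not tail[j].startswith("## "):
--         j += 1
--     return [[head] + tail[:j]] + _blocks(tail[j:])
--
--
-- def _try_insert(block, section_heading, bullet_line):
--     """If the block contains the heading, return the rewritten block, else None."""
--     if not block:
--         return None
--     head, rest = block[0], block[1:]
--     if head.strip() == section_heading:
--         k = 0
--         while k < len(rest) and rest[k].strip() == "":
--             k += 1
--         body = [line for line in rest[k:] if line.strip() != "-"]
--         return [head] + rest[:k] + body + [bullet_line]
--     sub = _try_insert(rest, section_heading, bullet_line)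
--     return None if sub is None else [head] + sub
--
--
-- def _insert_in_blocks(blocks, section_heading, bullet_line):
--     if not blocks:
--         return None
--     first, rest = blocks[0], blocks[1:]
--     nb = _try_insert(first, section_heading, bullet_line)
--     if nb is not None:
--         return nb + [line for block in rest for line in block]
--     sub = _insert_in_blocks(rest, section_heading, bullet_line)
--     return None if sub is None else first + sub
--
--
-- def upsert_bullet_in_section(markdown_text: str, section_heading: str, item: str) -> tuple[str, bool]:
--     bullet_line = ("- " + item).rstrip()
--     lines = markdown_text.splitlines()
--     if bullet_line in lines:
--         return markdown_text, False
--     out = _insert_in_blocks(_blocks(lines), section_heading, bullet_line)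
--     if out is None:
--         raise ValueError(f"section not found: {section_heading}")
--     return "\n".join(out).rstrip() + "\n", True
-- ===== Notes on version B (the rewrite author's own statement) =====
-- stated objective: alternative
-- what changed: A locates the section by a linear index search plus two index-advancing while loops and reassembles via slices; B splits the document once into '## '-delimited blocks, rewrites the single block containing the heading (recursively), and flattens the blocks back.
import Mathlib
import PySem

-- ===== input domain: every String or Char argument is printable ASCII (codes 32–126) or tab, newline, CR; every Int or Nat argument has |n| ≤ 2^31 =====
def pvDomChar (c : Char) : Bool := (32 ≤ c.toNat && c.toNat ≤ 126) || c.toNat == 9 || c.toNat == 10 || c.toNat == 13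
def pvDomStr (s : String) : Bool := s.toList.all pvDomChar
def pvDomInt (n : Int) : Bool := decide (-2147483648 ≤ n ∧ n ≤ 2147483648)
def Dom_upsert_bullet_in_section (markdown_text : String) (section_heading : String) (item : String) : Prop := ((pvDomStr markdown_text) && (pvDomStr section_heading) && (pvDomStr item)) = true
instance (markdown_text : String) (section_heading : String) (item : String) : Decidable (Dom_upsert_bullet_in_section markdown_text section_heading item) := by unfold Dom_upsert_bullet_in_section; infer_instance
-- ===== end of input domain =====

-- B replaces A's index arithmetic (find-index + two while loops + slices) by a one-pass
-- split of the document into heading-delimited blocks, rewriting the one block that holds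
-- the section and flattening back (objective: alternative decomposition, same cost).

-- ===== PORT A =====

-- next(index for index, line in enumerate(lines) if line.strip() == section_heading)
def pvFindSec (lines : List String) (section_heading : String) (i : Nat) : Option Nat :=
  match lines with
  | [] => none
  | x :: xs =>
    if PySem.Str.strip x == section_heading then some i else pvFindSec xs section_heading (i + 1)

-- while body_start < len(lines) and lines[body_start].strip() == "": body_start += 1
def pvSkipBlanks (lines : List String) (i : Nat) : Nat :=
  if hlt : i < lines.length then
    if PySem.Str.strip lines[i] == "" then pvSkipBlanks lines (i + 1) else i
  else i
termination_by lines.length - i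

-- while section_end < len(lines) and not lines[section_end].startswith("## "): section_end += 1
def pvFindEnd (lines : List String) (i : Nat) : Nat :=
  if hlt : i < lines.length then
    if PySem.Str.startswith lines[i] "## " then i else pvFindEnd lines (i + 1)
  else i
termination_by lines.length - i

def upsert_bullet_in_section (markdown_text : String) (section_heading : String) (item : String) : String × Bool :=
  let bullet_line := PySem.Str.rstrip ("- " ++ item)
  let lines := PySem.Str.splitlines markdown_text
  if lines.contains bullet_line then (markdown_text, false)
  else
    match pvFindSec lines section_heading 0 with
    | none => ("", false)   -- Python raises ValueError here; excluded by Pre_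
    | some section_start =>
      let body_start := pvSkipBlanks lines (section_start + 1)
      let section_end := pvFindEnd lines body_start
      let cleaned_body := (PySem.List.slice lines (some (body_start : Int)) (some (section_end : Int))).foldl
        (fun acc body_line => if PySem.Str.strip body_line == "-" then acc else acc ++ [body_line]) []
      let updated_lines := PySem.List.slice lines none (some (body_start : Int)) ++ cleaned_body
        ++ [bullet_line] ++ PySem.List.slice lines (some (section_end : Int)) none
      (PySem.Str.rstrip (PySem.Str.join "\n" updated_lines) ++ "\n", true)

-- ===== PORT B =====

-- _blocks: the j-scan 'while j < len(tail) and not tail[j].startswith("## ")' with the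
-- slices tail[:j] / tail[j:] is exactly the takeWhile/dropWhile split at that predicate.
def pvBlocks (lines : List String) : List (List String) :=
  match lines with
  | [] => []
  | head :: tail =>
    (head :: tail.takeWhile (fun l => !PySem.Str.startswith l "## ")) ::
      pvBlocks (tail.dropWhile (fun l => !PySem.Str.startswith l "## "))
termination_by lines.length
decreasing_by
  exact Nat.lt_succ_of_le (List.length_dropWhile_le _ tail)

-- _try_insert: the k-scan over blanks with the slices rest[:k] / rest[k:] is the
-- takeWhile/dropWhile split at 'strip == ""'; the comprehension is the filter.
def pvTryInsert (block : List String) (section_heading : String) (bullet_line : String) : Option (List String) :=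
  match block with
  | [] => none
  | head :: rest =>
    if PySem.Str.strip head == section_heading then
      some (head :: (rest.takeWhile (fun l => PySem.Str.strip l == "")
        ++ ((rest.dropWhile (fun l => PySem.Str.strip l == "")).filter
              (fun l => !(PySem.Str.strip l == "-")))
        ++ [bullet_line]))
    else (pvTryInsert rest section_heading bullet_line).map (head :: ·)

def pvInsertInBlocks (blocks : List (List String)) (section_heading : String) (bullet_line : String) : Option (List String) :=
  match blocks with
  | [] => none
  | first :: rest =>
    match pvTryInsert first section_heading bullet_line with
    | some nb => some (nb ++ rest.flatten)
    | none => (pvInsertInBlocks rest section_heading bullet_line).map (first ++ ·)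

def upsert_bullet_in_section_alt (markdown_text : String) (section_heading : String) (item : String) : String × Bool :=
  let bullet_line := PySem.Str.rstrip ("- " ++ item)
  let lines := PySem.Str.splitlines markdown_text
  if lines.contains bullet_line then (markdown_text, false)
  else
    match pvInsertInBlocks (pvBlocks lines) section_heading bullet_line with
    | none => ("", false)   -- Python raises ValueError here; excluded by Pre_
    | some out => (PySem.Str.rstrip (PySem.Str.join "\n" out) ++ "\n", true)

-- ===== PRECONDITION & SPEC =====

-- Pre_ excludes exactly the inputs on which A raises ValueError ("section not found"):
-- the bullet line is not already present AND no line strips to the section heading.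
def Pre_upsert_bullet_in_section (markdown_text : String) (section_heading : String) (item : String) : Prop :=
  (PySem.Str.splitlines markdown_text).contains (PySem.Str.rstrip ("- " ++ item)) = true
  ∨ ∃ l ∈ PySem.Str.splitlines markdown_text, PySem.Str.strip l = section_heading
instance (markdown_text : String) (section_heading : String) (item : String) : Decidable (Pre_upsert_bullet_in_section markdown_text section_heading item) := by unfold Pre_upsert_bullet_in_section; infer_instance

def pvWitness_upsert_bullet_in_section : String × String × String := ("## Links\n\n- old\n", "## Links", "new")

def Spec_upsert_bullet_in_section (markdown_text : String) (section_heading : String) (item : String) (out : String × Bool) : Prop := out = upsert_bullet_in_section_alt markdown_text section_heading item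
instance (markdown_text : String) (section_heading : String) (item : String) (out : String × Bool) : Decidable (Spec_upsert_bullet_in_section markdown_text section_heading item out) := by unfold Spec_upsert_bullet_in_section; infer_instance

-- ===== CLAIM (what is proved, stated in full; the proofs are below) =====
def Claim_equal_upsert_bullet_in_section : Prop := ∀ (markdown_text : String) (section_heading : String) (item : String), Dom_upsert_bullet_in_section markdown_text section_heading item → Pre_upsert_bullet_in_section markdown_text section_heading item → Spec_upsert_bullet_in_section markdown_text section_heading item (upsert_bullet_in_section markdown_text section_heading item)

-- ===== LEMMAS AND PROOFS =====

-- proof-side abbreviations for the three predicates both programs test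
def pvBlank (l : String) : Bool := PySem.Str.strip l == ""
def pvNotHH (l : String) : Bool := !PySem.Str.startswith l "## "
def pvNotDash (l : String) : Bool := !(PySem.Str.strip l == "-")

-- the lines A produces after the heading line, phrased structurally
def pvProcess (bullet_line : String) (xs : List String) : List String :=
  xs.takeWhile pvBlank
    ++ ((xs.dropWhile pvBlank).takeWhile pvNotHH).filter pvNotDash
    ++ [bullet_line]
    ++ (xs.dropWhile pvBlank).dropWhile pvNotHH

-- common recursive description of both cores
def pvAcore (section_heading bullet_line : String) : List String → Option (List String)
  | [] => none
  | x :: xs =>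
    if PySem.Str.strip x == section_heading then some (x :: pvProcess bullet_line xs)
    else (pvAcore section_heading bullet_line xs).map (x :: ·)

theorem pvHashNotBlank (l : String) (hh : PySem.Str.startswith l "## " = true) :
    pvBlank l = false := by
  rw [pvBlank, beq_eq_false_iff_ne]
  intro he
  have h0 : PySem.Chars.strip l.toList = [] := by
    rw [← PySem.Str.toList_strip, he]; rfl
  have hp : "## ".toList <+: l.toList := (PySem.Chars.startswith_iff _ _).mp (by simpa using hh)
  have hmem : '#' ∈ l.toList := hp.subset (by decide)
  simp only [PySem.Chars.strip, PySem.Chars.rstrip, PySem.Chars.lstrip,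
    List.reverse_eq_nil_iff, List.dropWhile_eq_nil_iff, List.mem_reverse] at h0
  have hdw : l.toList.dropWhile PySem.Chars.isspace = [] := by
    cases heq : l.toList.dropWhile PySem.Chars.isspace with
    | nil => rfl
    | cons z zs =>
      have hz : PySem.Chars.isspace z = false := by
        have := List.head_dropWhile_not PySem.Chars.isspace (l := l.toList) (by simp [heq])
        simpa [heq] using this
      have := h0 z (by simp [heq])
      rw [this] at hz; cases hz
  have hall := List.dropWhile_eq_nil_iff.mp hdw
  have := hall '#' hmem
  simp [PySem.Chars.isspace] at this

theorem pvFindSec_shift (h : String) : ∀ (xs : List String) (i : Nat),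
    pvFindSec xs h i = (pvFindSec xs h 0).map (· + i) := by
  intro xs
  induction xs with
  | nil => intro i; rfl
  | cons x xs ih =>
    intro i
    simp only [pvFindSec]
    by_cases hx : (PySem.Str.strip x == h) = true
    · simp [hx]
    · rw [if_neg hx, if_neg hx, ih (i + 1), ih 1, Option.map_map]
      congr 1
      funext j
      simp; omega

theorem pvAcore_eq_find (h b : String) (lines : List String) :
    pvAcore h b lines = (pvFindSec lines h 0).map
      (fun i => lines.take (i + 1) ++ pvProcess b (lines.drop (i + 1))) := by
  induction lines with
  | nil => rfl
  | cons x xs ih =>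
    simp only [pvAcore, pvFindSec]
    by_cases hx : (PySem.Str.strip x == h) = true
    · simp [hx]
    · rw [if_neg hx, if_neg hx, ih, pvFindSec_shift h xs 1, Option.map_map, Option.map_map]
      cases pvFindSec xs h 0 with
      | none => rfl
      | some j => simp [List.take_succ_cons]

theorem pvSkipBlanks_eq : ∀ (lines : List String) (i : Nat),
    pvSkipBlanks lines i = i + ((lines.drop i).takeWhile pvBlank).length := by
  intro lines i
  generalize hys : lines.drop i = ys
  induction ys generalizing i with
  | nil =>
    rw [pvSkipBlanks]
    have : ¬ i < lines.length := by
      intro hlt; have := List.drop_eq_nil_iff.mp hys; omega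
    simp [this]
  | cons y ys ih =>
    have hlt : i < lines.length := by
      by_contra hge
      rw [List.drop_eq_nil_of_le (by omega)] at hys; simp at hys
    have h2 := List.getElem_cons_drop (as := lines) (h := hlt)
    rw [hys] at h2
    have hy : lines[i] = y := (List.cons_eq_cons.mp h2.symm).1.symm
    have hdr : lines.drop (i + 1) = ys := (List.cons_eq_cons.mp h2.symm).2.symm
    rw [pvSkipBlanks]
    simp only [hlt, dif_pos, hy]
    by_cases hb : (PySem.Str.strip y == "") = true
    · rw [if_pos hb, ih (i + 1) hdr]
      simp [List.takeWhile, pvBlank, hb]; omega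
    · rw [if_neg hb]
      simp [List.takeWhile, pvBlank]
      rw [Bool.not_eq_true] at hb
      simp [hb]

theorem pvFindEnd_eq : ∀ (lines : List String) (i : Nat),
    pvFindEnd lines i = i + ((lines.drop i).takeWhile pvNotHH).length := by
  intro lines i
  generalize hys : lines.drop i = ys
  induction ys generalizing i with
  | nil =>
    rw [pvFindEnd]
    have : ¬ i < lines.length := by
      intro hlt; have := List.drop_eq_nil_iff.mp hys; omega
    simp [this]
  | cons y ys ih =>
    have hlt : i < lines.length := by
      by_contra hge
      rw [List.drop_eq_nil_of_le (by omega)] at hys; simp at hys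
    have h2 := List.getElem_cons_drop (as := lines) (h := hlt)
    rw [hys] at h2
    have hy : lines[i] = y := (List.cons_eq_cons.mp h2.symm).1.symm
    have hdr : lines.drop (i + 1) = ys := (List.cons_eq_cons.mp h2.symm).2.symm
    rw [pvFindEnd]
    simp only [hlt, dif_pos, hy]
    by_cases hb : (PySem.Str.startswith y "## ") = true
    · have hb' : PySem.Chars.startswith y.toList ['#', '#', ' '] = true := by simpa using hb
      rw [if_pos hb]
      simp [pvNotHH, hb']
    · have hb' : PySem.Chars.startswith y.toList ['#', '#', ' '] = false := by simpa using hb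
      rw [if_neg hb, ih (i + 1) hdr]
      simp [pvNotHH, hb']; omega

theorem pvFoldlFilter (b : List String) (xs : List String) :
    xs.foldl (fun acc l => if PySem.Str.strip l == "-" then acc else acc ++ [l]) b
      = b ++ xs.filter pvNotDash := by
  induction xs generalizing b with
  | nil => simp
  | cons x xs ih =>
    simp only [List.foldl_cons, List.filter_cons]
    by_cases hx : (PySem.Str.strip x == "-") = true
    · rw [if_pos hx, ih]; simp [pvNotDash, hx]
    · rw [if_neg hx, ih]; rw [Bool.not_eq_true] at hx; simp [pvNotDash, hx]

theorem pvBlocks_flatten (lines : List String) : (pvBlocks lines).flatten = lines := by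
  generalize hn : lines.length = n
  induction n using Nat.strong_induction_on generalizing lines with
  | _ n ih =>
    cases lines with
    | nil => rw [pvBlocks]; rfl
    | cons x xs =>
      rw [pvBlocks]
      simp only [List.flatten_cons]
      rw [ih (xs.dropWhile (fun l => !PySem.Str.startswith l "## ")).length
        (by subst hn; exact Nat.lt_succ_of_le (List.length_dropWhile_le _ xs)) _ rfl]
      simp [List.takeWhile_append_dropWhile]

-- splitting A's post-heading processing at a block boundary
theorem pvProcess_split (b : String) (t d : List String)
    (ht : ∀ l ∈ t, pvNotHH l = true)
    (hd : d = [] ∨ ∃ z r, d = z :: r ∧ PySem.Str.startswith z "## " = true) :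
    pvProcess b (t ++ d) =
      (t.takeWhile pvBlank ++ (t.dropWhile pvBlank).filter pvNotDash ++ [b]) ++ d := by
  have hblank_d : List.takeWhile pvBlank d = [] := by
    rcases hd with rfl | ⟨z, r, rfl, hz⟩
    · rfl
    · simp [pvHashNotBlank z hz]
  have hdw_blank : List.dropWhile pvBlank (t ++ d) = List.dropWhile pvBlank t ++ d := by
    rw [List.dropWhile_append]
    split
    · next hemp =>
      have he : List.dropWhile pvBlank t = [] := by simpa using hemp
      rw [he]
      rcases hd with rfl | ⟨z, r, rfl, hz⟩
      · rfl
      · simp [pvHashNotBlank z hz]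
    · rfl
  have htw_blank : List.takeWhile pvBlank (t ++ d) = List.takeWhile pvBlank t := by
    rw [List.takeWhile_append]
    split
    · next hlen =>
      have hts : List.takeWhile pvBlank t = t :=
        (List.takeWhile_prefix pvBlank).eq_of_length hlen
      rw [hblank_d, hts, List.append_nil]
    · rfl
  have hdwt : ∀ l ∈ List.dropWhile pvBlank t, pvNotHH l = true :=
    fun l hl => ht l ((List.dropWhile_sublist _).subset hl)
  have htw_d : List.takeWhile pvNotHH d = [] := by
    rcases hd with rfl | ⟨z, r, rfl, hz⟩
    · rfl
    · have hz' : PySem.Chars.startswith z.toList ['#', '#', ' '] = true := by simpa using hz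
      simp [pvNotHH, hz']
  have hdw_d : List.dropWhile pvNotHH d = d := by
    rcases hd with rfl | ⟨z, r, rfl, hz⟩
    · rfl
    · have hz' : PySem.Chars.startswith z.toList ['#', '#', ' '] = true := by simpa using hz
      simp [pvNotHH, hz']
  have htw_nh : List.takeWhile pvNotHH (List.dropWhile pvBlank t ++ d)
      = List.dropWhile pvBlank t := by
    rw [List.takeWhile_append]
    have hts : List.takeWhile pvNotHH (List.dropWhile pvBlank t)
        = List.dropWhile pvBlank t := List.takeWhile_eq_self_iff.mpr hdwt
    rw [hts]
    simp [htw_d]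
  have hdw_nh : List.dropWhile pvNotHH (List.dropWhile pvBlank t ++ d) = d := by
    rw [List.dropWhile_append]
    have hds : List.dropWhile pvNotHH (List.dropWhile pvBlank t) = [] :=
      List.dropWhile_eq_nil_iff.mpr hdwt
    rw [hds]
    simp [hdw_d]
  rw [pvProcess, htw_blank, hdw_blank, htw_nh, hdw_nh]

-- inside one block: the cons-recursive core against _try_insert
theorem pvTryInsert_core (h b : String) (t d : List String)
    (ht : ∀ l ∈ t, pvNotHH l = true)
    (hd : d = [] ∨ ∃ z r, d = z :: r ∧ PySem.Str.startswith z "## " = true) :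
    pvAcore h b (t ++ d) =
      match pvTryInsert t h b with
      | some nb => some (nb ++ d)
      | none => (pvAcore h b d).map (t ++ ·) := by
  induction t with
  | nil => simp [pvTryInsert]
  | cons y ys ih =>
    have hys : ∀ l ∈ ys, pvNotHH l = true := fun l hl => ht l (List.mem_cons_of_mem _ hl)
    simp only [List.cons_append, pvAcore, pvTryInsert]
    by_cases hy : (PySem.Str.strip y == h) = true
    · rw [if_pos hy, if_pos hy]
      congr 1
      rw [pvProcess_split b ys d hys hd]
      rfl
    · rw [if_neg hy, if_neg hy, ih hys]
      cases htr : pvTryInsert ys h b with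
      | some nb => simp
      | none => simp [Option.map_map]; rfl

theorem pvCore_eq (h b : String) (lines : List String) :
    pvInsertInBlocks (pvBlocks lines) h b = pvAcore h b lines := by
  generalize hn : lines.length = n
  induction n using Nat.strong_induction_on generalizing lines with
  | _ n ih =>
    cases lines with
    | nil => rw [pvBlocks]; rfl
    | cons x xs =>
      rw [pvBlocks]
      set p := fun l => !PySem.Str.startswith l "## " with hp
      set t := xs.takeWhile p with htdef
      set d := xs.dropWhile p with hddef
      have ht : ∀ l ∈ t, pvNotHH l = true := fun l hl => by
        have := List.mem_takeWhile_imp hl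
        simpa [pvNotHH, hp] using this
      have hd : d = [] ∨ ∃ z r, d = z :: r ∧ PySem.Str.startswith z "## " = true := by
        cases hdq : d with
        | nil => exact Or.inl rfl
        | cons z r =>
          refine Or.inr ⟨z, r, rfl, ?_⟩
          have h1 : xs.dropWhile p ≠ [] := by rw [← hddef, hdq]; simp
          have h2 := List.head_dropWhile_not p h1
          have h3 : (xs.dropWhile p).head h1 = z := by simp [← hddef, hdq]
          rw [h3, hp] at h2
          simpa using h2
      have hxs : t ++ d = xs := List.takeWhile_append_dropWhile
      have hdlt : ∀ m, m = d.length → m < n := by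
        intro m hm
        subst hn hm
        rw [hddef]
        exact Nat.lt_succ_of_le (List.length_dropWhile_le _ xs)
      simp only [pvInsertInBlocks, pvTryInsert, pvAcore]
      by_cases hx : (PySem.Str.strip x == h) = true
      · simp only [hx, if_true]
        rw [pvBlocks_flatten]
        conv_rhs => rw [← hxs]
        rw [pvProcess_split b t d ht hd]
        simp only [List.cons_append, List.append_assoc]
        rfl
      · simp only [hx, Bool.false_eq_true, if_false]
        conv_rhs => rw [← hxs]
        rw [pvTryInsert_core h b t d ht hd]
        cases htr : pvTryInsert t h b with
        | some nb =>
          simp only [Option.map_some]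
          rw [pvBlocks_flatten]
          simp
        | none =>
          simp only [Option.map_none]
          rw [ih d.length (hdlt _ rfl) d rfl]
          simp [Option.map_map]
          rfl

-- A's index-and-slice assembly equals take/process at the found index
theorem pvA_branch (b : String) (lines : List String) (i : Nat) :
    PySem.List.slice lines none (some ((pvSkipBlanks lines (i + 1) : Nat) : Int))
      ++ (PySem.List.slice lines (some ((pvSkipBlanks lines (i + 1) : Nat) : Int))
            (some ((pvFindEnd lines (pvSkipBlanks lines (i + 1)) : Nat) : Int))).foldl
          (fun acc body_line => if PySem.Str.strip body_line == "-" then acc else acc ++ [body_line]) []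
      ++ [b]
      ++ PySem.List.slice lines (some ((pvFindEnd lines (pvSkipBlanks lines (i + 1)) : Nat) : Int)) none
    = lines.take (i + 1) ++ pvProcess b (lines.drop (i + 1)) := by
  rw [pvSkipBlanks_eq, pvFindEnd_eq, PySem.List.slice_to_natCast, PySem.List.slice_natCast,
    PySem.List.slice_from_natCast, pvFoldlFilter]
  have hdrop1 : lines.drop (i + 1 + ((lines.drop (i + 1)).takeWhile pvBlank).length)
      = (lines.drop (i + 1)).dropWhile pvBlank := by
    rw [← List.drop_drop]
    nth_rewrite 2 [← List.takeWhile_append_dropWhile (p := pvBlank) (l := lines.drop (i + 1))]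
    exact List.drop_left
  have htake1 : lines.take (i + 1 + ((lines.drop (i + 1)).takeWhile pvBlank).length)
      = lines.take (i + 1) ++ (lines.drop (i + 1)).takeWhile pvBlank := by
    rw [List.take_add]
    congr 1
    nth_rewrite 2 [← List.takeWhile_append_dropWhile (p := pvBlank) (l := lines.drop (i + 1))]
    exact List.take_left
  rw [hdrop1, htake1, Nat.add_sub_cancel_left]
  have htake2 : ((lines.drop (i + 1)).dropWhile pvBlank).take
      ((((lines.drop (i + 1)).dropWhile pvBlank).takeWhile pvNotHH).length)
      = ((lines.drop (i + 1)).dropWhile pvBlank).takeWhile pvNotHH := by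
    nth_rewrite 2 [← List.takeWhile_append_dropWhile (p := pvNotHH)
      (l := (lines.drop (i + 1)).dropWhile pvBlank)]
    exact List.take_left
  have hdrop2 : lines.drop (i + 1 + ((lines.drop (i + 1)).takeWhile pvBlank).length
        + (((lines.drop (i + 1)).dropWhile pvBlank).takeWhile pvNotHH).length)
      = ((lines.drop (i + 1)).dropWhile pvBlank).dropWhile pvNotHH := by
    rw [← List.drop_drop, hdrop1]
    nth_rewrite 2 [← List.takeWhile_append_dropWhile (p := pvNotHH)
      (l := (lines.drop (i + 1)).dropWhile pvBlank)]
    exact List.drop_left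
  rw [htake2, hdrop2, pvProcess]
  simp [List.append_assoc]

-- ===== VERDICT (by name: the statement is the Claim_ definition above) =====
theorem upsert_bullet_in_section_spec : Claim_equal_upsert_bullet_in_section := by
  intro markdown_text section_heading item _ _
  unfold Spec_upsert_bullet_in_section
  simp only [upsert_bullet_in_section, upsert_bullet_in_section_alt]
  by_cases hc : (PySem.Str.splitlines markdown_text).contains
      (PySem.Str.rstrip ("- " ++ item)) = true
  · have hm : PySem.Str.rstrip ("- " ++ item) ∈ PySem.Str.splitlines markdown_text := by
      simpa using hc
    simp [hm]
  · simp only [Bool.not_eq_true] at hc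
    simp only [hc, Bool.false_eq_true, if_false]
    rw [pvCore_eq, pvAcore_eq_find]
    cases hfs : pvFindSec (PySem.Str.splitlines markdown_text) section_heading 0 with
    | none => rfl
    | some i =>
      simp only [Option.map_some]
      rw [pvA_branch]
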